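-- pv_equiv track=rewrite | github.com/omar-shahieen/gitsh | src/merge.py | merge_tree_maps
-- ===== SOURCE A (Python) =====
-- def merge_tree_maps(base_map, ours_map, theirs_map):
--     """Merge two file maps using a simple three-way merge."""
--     merged = {}
--     conflicts = []
--
--     for path in sorted(set(base_map) | set(ours_map) | set(theirs_map)):
--         base_sha = base_map.get(path)
--         ours_sha = ours_map.get(path)
--         theirs_sha = theirs_map.get(path)
--
--         if ours_sha == theirs_sha:
--             if ours_sha is not None:
--                 merged[path] = ours_sha
--             continue
--
--         if ours_sha == base_sha:
--             if theirs_sha is not None: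
--                 merged[path] = theirs_sha
--             continue
--
--         if theirs_sha == base_sha:
--             if ours_sha is not None:
--                 merged[path] = ours_sha
--             continue
--
--         if base_sha is None:
--             if ours_sha is None and theirs_sha is not None:
--                 merged[path] = theirs_sha
--                 continue
--             if theirs_sha is None and ours_sha is not None:
--                 merged[path] = ours_sha
--                 continue
--
--         conflicts.append(path)
--
--     return merged, conflicts
-- ===== SOURCE B (Python) =====
-- def merge_tree_maps(base_map, ours_map, theirs_map):
--     """Three-way merge by patch application: compute each side's diff against
--     base, detect conflicting patches, overlay the patches on base, then drop
--     deletions and conflicting paths."""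
--     ours_diff = {p: ours_map.get(p)
--                  for p in set(base_map) | set(ours_map)
--                  if ours_map.get(p) != base_map.get(p)}
--     theirs_diff = {p: theirs_map.get(p)
--                    for p in set(base_map) | set(theirs_map)
--                    if theirs_map.get(p) != base_map.get(p)}
--     conflicts = {p for p in ours_diff
--                  if p in theirs_diff and ours_diff[p] != theirs_diff[p]}
--     combined = {**base_map, **ours_diff, **theirs_diff}
--     merged = {p: combined[p] for p in sorted(combined)
--               if combined[p] is not None and p not in conflicts}
--     return merged, sorted(conflicts)
-- ===== Notes on version B (the rewrite author's own statement) =====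
-- stated objective: alternative
-- what changed: B replaces A's single classified walk with patch application: it builds each side's diff-against-base as a dict, takes the conflicts as the keys patched differently by both diffs, overlays {**base, **ours_diff, **theirs_diff} by dict update, and finally filters out deletions and conflicted paths; A's dead base-is-None block is dropped.
import Mathlib
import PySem

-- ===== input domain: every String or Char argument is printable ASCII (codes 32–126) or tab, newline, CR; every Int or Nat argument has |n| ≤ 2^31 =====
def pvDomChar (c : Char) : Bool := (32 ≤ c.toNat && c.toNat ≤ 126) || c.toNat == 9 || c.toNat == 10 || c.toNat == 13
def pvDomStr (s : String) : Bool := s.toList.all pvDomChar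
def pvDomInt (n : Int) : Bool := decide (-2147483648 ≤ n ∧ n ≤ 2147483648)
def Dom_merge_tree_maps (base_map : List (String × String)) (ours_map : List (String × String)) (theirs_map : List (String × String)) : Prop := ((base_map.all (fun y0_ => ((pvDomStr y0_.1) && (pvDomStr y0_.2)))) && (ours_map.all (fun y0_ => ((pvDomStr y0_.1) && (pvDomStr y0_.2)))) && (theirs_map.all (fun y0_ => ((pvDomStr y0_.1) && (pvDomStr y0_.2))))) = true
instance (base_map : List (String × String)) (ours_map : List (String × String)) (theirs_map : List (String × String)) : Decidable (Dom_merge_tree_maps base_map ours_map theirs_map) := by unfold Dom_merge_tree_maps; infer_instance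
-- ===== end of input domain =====

-- B recasts the merge as patch application: it computes each side's diff against base,
-- detects conflicting patches, overlays the patches on base with dict updates, and
-- drops deletions and conflicts at the end; objective: alternative decomposition, same cost.

-- ===== PORT A =====
-- the body of A's for-loop, named so the proofs can speak about it
def pvStepA (base_map ours_map theirs_map : List (String × String))
    (s : PySem.Dict String String × List String) (path : String) :
    PySem.Dict String String × List String :=
  let merged := s.1
  let conflicts := s.2
  let base_sha := (PySem.Dict.mk base_map).get? path
  let ours_sha := (PySem.Dict.mk ours_map).get? path
  let theirs_sha := (PySem.Dict.mk theirs_map).get? path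
  if ours_sha = theirs_sha then
    (match ours_sha with
     | some v => merged.insert path v
     | none => merged, conflicts)
  else if ours_sha = base_sha then
    (match theirs_sha with
     | some v => merged.insert path v
     | none => merged, conflicts)
  else if theirs_sha = base_sha then
    (match ours_sha with
     | some v => merged.insert path v
     | none => merged, conflicts)
  else if base_sha = none then
    if ours_sha = none ∧ theirs_sha ≠ none then
      (match theirs_sha with
       | some v => merged.insert path v
       | none => merged, conflicts)
    else if theirs_sha = none ∧ ours_sha ≠ none then
      (match ours_sha with
       | some v => merged.insert path v
       | none => merged, conflicts)
    else (merged, conflicts ++ [path])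
  else (merged, conflicts ++ [path])

def merge_tree_maps (base_map : List (String × String)) (ours_map : List (String × String)) (theirs_map : List (String × String)) : (List (String × String)) × List String :=
  -- sorted(set(base_map) | set(ours_map) | set(theirs_map)): union of the key sets, sorted
  let paths := PySem.List.sorted
    (PySem.Set.union (PySem.Set.union (PySem.Set.ofList (base_map.map Prod.fst)) (ours_map.map Prod.fst)) (theirs_map.map Prod.fst))
    (fun p => p)
  let r := paths.foldl (pvStepA base_map ours_map theirs_map)
    ((PySem.Dict.mk [] : PySem.Dict String String), ([] : List String))
  (r.1.items, r.2)

-- ===== PORT B =====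
-- one side's diff against base: {p: side.get(p) for p in set(base)|set(side) if side.get(p) != base.get(p)}
def pvSideDiff (base_map side_map : List (String × String)) : PySem.Dict String (Option String) :=
  (PySem.Set.union (PySem.Set.ofList (base_map.map Prod.fst)) (side_map.map Prod.fst)).foldl
    (fun d p =>
      if (PySem.Dict.mk side_map).get? p ≠ (PySem.Dict.mk base_map).get? p
      then d.insert p ((PySem.Dict.mk side_map).get? p) else d)
    PySem.Dict.empty

-- {p for p in ours_diff if p in theirs_diff and ours_diff[p] != theirs_diff[p]}
def pvConflictsB (base_map ours_map theirs_map : List (String × String)) : PySem.Set String :=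
  PySem.Set.ofList
    ((pvSideDiff base_map ours_map).keys.filter
      (fun p => (pvSideDiff base_map theirs_map).contains p
        && ((pvSideDiff base_map ours_map).get? p != (pvSideDiff base_map theirs_map).get? p)))

-- {**base_map, **ours_diff, **theirs_diff}
def pvCombined (base_map ours_map theirs_map : List (String × String)) : PySem.Dict String (Option String) :=
  ((PySem.Dict.mk (base_map.map (fun kv => (kv.1, some kv.2)))).update
      (pvSideDiff base_map ours_map).items).update (pvSideDiff base_map theirs_map).items

-- the body of B's final dict comprehension: keep combined[p] if it is a sha and p is not conflicted
def pvStepB (base_map ours_map theirs_map : List (String × String)) (conflicts : PySem.Set String)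
    (d : PySem.Dict String String) (p : String) : PySem.Dict String String :=
  match (pvCombined base_map ours_map theirs_map).get? p with
  | some (some v) => if conflicts.contains p then d else d.insert p v
  | _ => d

def merge_tree_maps_alt (base_map : List (String × String)) (ours_map : List (String × String)) (theirs_map : List (String × String)) : (List (String × String)) × List String :=
  let conflicts := pvConflictsB base_map ours_map theirs_map
  -- {p: combined[p] for p in sorted(combined) if combined[p] is not None and p not in conflicts}
  let merged := (PySem.List.sorted (pvCombined base_map ours_map theirs_map).keys (fun p => p)).foldl
    (pvStepB base_map ours_map theirs_map conflicts)
    (PySem.Dict.empty : PySem.Dict String String)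
  (merged.items, PySem.List.sorted conflicts (fun p => p))

-- ===== PRECONDITION & SPEC =====
-- Pre_ excludes association lists with duplicate keys: they do not encode a Python dict
-- (dict(pairs) collapses them), and first- vs last-occurrence lookup on such lists is an
-- artefact of the assoc-list encoding, not of either Python program.
def Pre_merge_tree_maps (base_map : List (String × String)) (ours_map : List (String × String)) (theirs_map : List (String × String)) : Prop :=
  (base_map.map Prod.fst).Nodup ∧ (ours_map.map Prod.fst).Nodup ∧ (theirs_map.map Prod.fst).Nodup
instance (base_map : List (String × String)) (ours_map : List (String × String)) (theirs_map : List (String × String)) : Decidable (Pre_merge_tree_maps base_map ours_map theirs_map) := by unfold Pre_merge_tree_maps; infer_instance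

def pvWitness_merge_tree_maps : (List (String × String)) × (List (String × String)) × (List (String × String)) :=
  ([("f.txt", "a1")], [("f.txt", "b2")], [("f.txt", "a1"), ("g.txt", "c3")])

def Spec_merge_tree_maps (base_map : List (String × String)) (ours_map : List (String × String)) (theirs_map : List (String × String)) (out : (List (String × String)) × List String) : Prop := out = merge_tree_maps_alt base_map ours_map theirs_map
instance (base_map : List (String × String)) (ours_map : List (String × String)) (theirs_map : List (String × String)) (out : (List (String × String)) × List String) : Decidable (Spec_merge_tree_maps base_map ours_map theirs_map out) := by unfold Spec_merge_tree_maps; infer_instance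

-- ===== CLAIM (what is proved, stated in full; the proofs are below) =====
def Claim_equal_merge_tree_maps : Prop := ∀ (base_map : List (String × String)) (ours_map : List (String × String)) (theirs_map : List (String × String)), Dom_merge_tree_maps base_map ours_map theirs_map → Pre_merge_tree_maps base_map ours_map theirs_map → Spec_merge_tree_maps base_map ours_map theirs_map (merge_tree_maps base_map ours_map theirs_map)

-- ===== LEMMAS AND PROOFS =====

-- a "conditionally insert fresh keys" loop, the common shape of both programs' dict building
def pvFoldIns {ν : Type} (F : String → Option ν) (ps : List String) : PySem.Dict String ν :=
  ps.foldl (fun d p => (F p).elim d (fun v => d.insert p v)) PySem.Dict.empty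

-- the value A's loop stores for a path (none = stores nothing), and A's conflict test,
-- as functions of the three looked-up shas
def pvChoose (b o t : Option String) : Option String :=
  if o = t then o
  else if o = b then t
  else if t = b then o
  else if b = none then
    (if o = none ∧ t ≠ none then t
     else if t = none ∧ o ≠ none then o
     else none)
  else none

def pvConfl (b o t : Option String) : Bool := decide (o ≠ t ∧ o ≠ b ∧ t ≠ b)

def pvFA (bm om tm : List (String × String)) (p : String) : Option String :=
  pvChoose ((PySem.Dict.mk bm).get? p) ((PySem.Dict.mk om).get? p) ((PySem.Dict.mk tm).get? p)

def pvGA (bm om tm : List (String × String)) (p : String) : Bool :=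
  pvConfl ((PySem.Dict.mk bm).get? p) ((PySem.Dict.mk om).get? p) ((PySem.Dict.mk tm).get? p)

def pvFB (bm om tm : List (String × String)) (p : String) : Option String :=
  match (pvCombined bm om tm).get? p with
  | some (some v) => if (pvConflictsB bm om tm).contains p then none else some v
  | _ => none

-- A's loop body is a pair of independent folds over pvFA / pvGA
lemma pvStepA_eq (bm om tm : List (String × String)) (s : PySem.Dict String String × List String) (p : String) :
    pvStepA bm om tm s p =
      ((pvFA bm om tm p).elim s.1 (fun v => s.1.insert p v),
       (if pvGA bm om tm p then s.2 ++ [p] else s.2)) := by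
  unfold pvStepA pvFA pvGA pvChoose pvConfl
  generalize (PySem.Dict.mk bm).get? p = b
  generalize (PySem.Dict.mk om).get? p = o
  generalize (PySem.Dict.mk tm).get? p = t
  rcases b with _ | bv <;> rcases o with _ | ov <;> rcases t with _ | tv <;>
    simp only [] <;> split_ifs <;> simp_all

-- B's loop body is the same fold shape over pvFB
lemma pvStepB_eq (bm om tm : List (String × String)) (d : PySem.Dict String String) (p : String) :
    pvStepB bm om tm (pvConflictsB bm om tm) d p
      = (pvFB bm om tm p).elim d (fun v => d.insert p v) := by
  unfold pvStepB pvFB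
  rcases h : (pvCombined bm om tm).get? p with _ | (_ | v)
  · simp
  · simp
  · by_cases hc : p ∈ pvConflictsB bm om tm <;> simp [hc]

-- key list of the filterMap a conditional-insert loop produces
lemma map_fst_filterMap_opt {ν : Type} (F : String → Option ν) (ps : List String) :
    (ps.filterMap (fun p => (F p).map (fun v => (p, v)))).map Prod.fst
      = ps.filter (fun p => (F p).isSome) := by
  induction ps with
  | nil => simp
  | cons p rest ih => cases hF : F p <;> simp [hF, ih]

-- a loop that conditionally inserts fresh distinct keys appends exactly the filterMap
lemma items_foldl_optInsert {ν : Type} (F : String → Option ν) (ps : List String)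
    (d : PySem.Dict String ν) (hnd : d.keys.Nodup)
    (hfresh : ∀ p ∈ ps, d.contains p = false) (hps : ps.Nodup) :
    (ps.foldl (fun d p => (F p).elim d (fun v => d.insert p v)) d).items
      = d.items ++ ps.filterMap (fun p => (F p).map (fun v => (p, v))) := by
  induction ps generalizing d with
  | nil => simp
  | cons p rest ih =>
    have hpfresh := hfresh p (List.mem_cons_self)
    cases hF : F p with
    | none =>
      simp only [List.foldl_cons, hF, Option.elim_none]
      rw [ih d hnd (fun q hq => hfresh q (List.mem_cons_of_mem _ hq)) hps.of_cons]
      simp [hF]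
    | some v =>
      simp only [List.foldl_cons, hF, Option.elim_some]
      rw [ih (d.insert p v) (PySem.Dict.nodup_keys_insert d p v hnd)
          (fun q hq => by
            rw [PySem.Dict.contains_insert]
            have hqp : q ≠ p := fun h => (List.nodup_cons.mp hps).1 (h ▸ hq)
            simp [hqp, hfresh q (List.mem_cons_of_mem _ hq)])
          hps.of_cons]
      rw [PySem.Dict.items_insert_of_not_contains d v hpfresh]
      simp [hF]

lemma pvFoldIns_items {ν : Type} (F : String → Option ν) (ps : List String) (hps : ps.Nodup) :
    (pvFoldIns F ps).items = ps.filterMap (fun p => (F p).map (fun v => (p, v))) := by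
  unfold pvFoldIns
  rw [items_foldl_optInsert F ps PySem.Dict.empty (by simp) (fun _ _ => by simp) hps]
  simp [PySem.Dict.empty]

lemma pvFoldIns_keys {ν : Type} (F : String → Option ν) (ps : List String) (hps : ps.Nodup) :
    (pvFoldIns F ps).keys = ps.filter (fun p => (F p).isSome) := by
  show (pvFoldIns F ps).items.map Prod.fst = _
  rw [pvFoldIns_items F ps hps, map_fst_filterMap_opt]

lemma pvFoldIns_get {ν : Type} (F : String → Option ν) (ps : List String)
    (hps : ps.Nodup) (q : String) :
    (pvFoldIns F ps).get? q = if q ∈ ps then F q else none := by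
  have hkeys := pvFoldIns_keys F ps hps
  have hknd : (pvFoldIns F ps).keys.Nodup := by rw [hkeys]; exact hps.filter _
  by_cases hq : q ∈ ps
  · cases hF : F q with
    | none =>
      have : q ∉ (pvFoldIns F ps).keys := by
        rw [hkeys]; intro h
        have := (List.mem_filter.mp h).2
        simp [hF] at this
      rw [← PySem.Dict.get?_eq_none_iff_not_mem_keys] at this
      simp [this, hq]
    | some v =>
      have hmem : (q, v) ∈ (pvFoldIns F ps).items := by
        rw [pvFoldIns_items F ps hps]
        exact List.mem_filterMap.mpr ⟨q, hq, by simp [hF]⟩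
      rw [PySem.Dict.get?_of_mem_items _ hmem hknd]
      simp [hq]
  · have : q ∉ (pvFoldIns F ps).keys := by
      rw [hkeys]; intro h; exact hq (List.mem_filter.mp h).1
    rw [← PySem.Dict.get?_eq_none_iff_not_mem_keys] at this
    simp [this, hq]

lemma pvFoldIns_congr {ν : Type} (F G : String → Option ν) (ps : List String)
    (h : ∀ p ∈ ps, F p = G p) : pvFoldIns F ps = pvFoldIns G ps := by
  unfold pvFoldIns
  exact PySem.List.foldl_congr_mem _ _ _ _ (fun d p hp => by rw [h p hp])

-- membership in a map's key list, via its lookup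
lemma mem_keys_iff_get (m : List (String × String)) (q : String) :
    q ∈ m.map Prod.fst ↔ (PySem.Dict.mk m).get? q ≠ none := by
  simp only [ne_eq, PySem.Dict.get?_eq_none_iff_not_mem_keys, PySem.Dict.keys_mk]
  tauto

-- lookup in the dict of base pairs wrapped in `some`
lemma mkmap_get (m : List (String × String)) (q : String) :
    (PySem.Dict.mk (m.map (fun kv => (kv.1, some kv.2)))).get? q
      = ((PySem.Dict.mk m).get? q).map some := by
  induction m with
  | nil => simp [PySem.Dict.get?]
  | cons kv rest ih =>
    simp only [List.map_cons]
    rw [PySem.Dict.get?_mk_cons, PySem.Dict.get?_mk_cons]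
    by_cases h : kv.1 == q <;> simp [h, ih]

-- lookup after dict.update with a duplicate-free pair list
lemma get?_update_nodup {ν : Type} (d : PySem.Dict String ν) (pairs : List (String × ν))
    (hnd : (pairs.map Prod.fst).Nodup) (q : String) :
    (d.update pairs).get? q
      = if q ∈ pairs.map Prod.fst then (PySem.Dict.mk pairs).get? q else d.get? q := by
  induction pairs generalizing d with
  | nil => simp [PySem.Dict.update, PySem.Dict.get?]
  | cons kv rest ih =>
    simp only [List.map_cons] at hnd ⊢
    have hrest := (List.nodup_cons.mp hnd).2
    have hknotin := (List.nodup_cons.mp hnd).1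
    show ((d.insert kv.1 kv.2).update rest).get? q = _
    rw [ih (d.insert kv.1 kv.2) hrest, PySem.Dict.get?_mk_cons]
    by_cases hqk : q = kv.1
    · subst hqk
      rw [if_neg hknotin, PySem.Dict.get?_insert_self]
      simp
    · have hne : (kv.1 == q) = false := by simp [Ne.symm hqk]
      rw [PySem.Dict.get?_insert_of_ne d kv.2 hqk]
      by_cases hmem : q ∈ rest.map Prod.fst <;> simp [hmem, hne, hqk]

-- the diff loop is a pvFoldIns
lemma sideDiff_eq_foldIns (bm sm : List (String × String)) :
    pvSideDiff bm sm
      = pvFoldIns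
          (fun p => if (PySem.Dict.mk sm).get? p ≠ (PySem.Dict.mk bm).get? p
            then some ((PySem.Dict.mk sm).get? p) else none)
          (PySem.Set.union (PySem.Set.ofList (bm.map Prod.fst)) (sm.map Prod.fst)) := by
  unfold pvSideDiff pvFoldIns
  exact PySem.List.foldl_congr_mem _ _ _ _ (fun d p _ => by
    by_cases h : (PySem.Dict.mk sm).get? p ≠ (PySem.Dict.mk bm).get? p <;> simp [h])

-- characterisation of one side's diff dict
lemma sideDiff_get (bm sm : List (String × String)) (q : String) :
    (pvSideDiff bm sm).get? q
      = if (PySem.Dict.mk sm).get? q ≠ (PySem.Dict.mk bm).get? q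
        then some ((PySem.Dict.mk sm).get? q) else none := by
  have hnd : (PySem.Set.union (PySem.Set.ofList (bm.map Prod.fst)) (sm.map Prod.fst)).Nodup :=
    PySem.Set.nodup_union _ _ (PySem.Set.nodup_ofList _)
  rw [sideDiff_eq_foldIns, pvFoldIns_get _ _ hnd q]
  by_cases hq : q ∈ (PySem.Set.union (PySem.Set.ofList (bm.map Prod.fst)) (sm.map Prod.fst))
  · simp [hq]
  · have hqb : q ∉ bm.map Prod.fst := fun h =>
      hq ((PySem.Set.mem_union _ _ q).mpr (Or.inl ((PySem.Set.mem_ofList _ q).mpr h)))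
    have hqs : q ∉ sm.map Prod.fst := fun h =>
      hq ((PySem.Set.mem_union _ _ q).mpr (Or.inr h))
    rw [mem_keys_iff_get] at hqb hqs
    simp only [ne_eq, not_not] at hqb hqs
    simp [hq, hqb, hqs]

lemma sideDiff_keys (bm sm : List (String × String)) :
    (pvSideDiff bm sm).keys
      = (PySem.Set.union (PySem.Set.ofList (bm.map Prod.fst)) (sm.map Prod.fst)).filter
          (fun p => (PySem.Dict.mk sm).get? p ≠ (PySem.Dict.mk bm).get? p) := by
  have hnd : (PySem.Set.union (PySem.Set.ofList (bm.map Prod.fst)) (sm.map Prod.fst)).Nodup :=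
    PySem.Set.nodup_union _ _ (PySem.Set.nodup_ofList _)
  rw [sideDiff_eq_foldIns, pvFoldIns_keys _ _ hnd]
  congr 1
  funext p
  by_cases h : (PySem.Dict.mk sm).get? p ≠ (PySem.Dict.mk bm).get? p <;> simp [h]

lemma sideDiff_mem_keys (bm sm : List (String × String)) (q : String) :
    q ∈ (pvSideDiff bm sm).keys ↔ (PySem.Dict.mk sm).get? q ≠ (PySem.Dict.mk bm).get? q := by
  rw [sideDiff_keys, List.mem_filter]
  constructor
  · intro ⟨_, h⟩; simpa using h
  · intro h
    refine ⟨?_, by simpa using h⟩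
    rcases (em ((PySem.Dict.mk sm).get? q = none)) with hs | hs
    · have hb : (PySem.Dict.mk bm).get? q ≠ none := fun hb => h (by rw [hs, hb])
      exact (PySem.Set.mem_union _ _ q).mpr (Or.inl ((PySem.Set.mem_ofList _ q).mpr
        ((mem_keys_iff_get bm q).mpr hb)))
    · exact (PySem.Set.mem_union _ _ q).mpr (Or.inr ((mem_keys_iff_get sm q).mpr hs))

lemma sideDiff_nodup (bm sm : List (String × String)) : (pvSideDiff bm sm).keys.Nodup := by
  rw [sideDiff_keys]
  exact (PySem.Set.nodup_union _ _ (PySem.Set.nodup_ofList _)).filter _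

-- membership in B's conflict list
lemma conflictsB_mem (bm om tm : List (String × String)) (q : String) :
    q ∈ pvConflictsB bm om tm ↔ pvGA bm om tm q = true := by
  unfold pvConflictsB pvGA pvConfl
  rw [PySem.Set.mem_ofList, List.mem_filter, sideDiff_mem_keys]
  constructor
  · intro ⟨ho, hpred⟩
    have ht : (pvSideDiff bm tm).contains q = true := by
      simpa using (Bool.and_elim_left hpred)
    have hq : (PySem.Dict.mk tm).get? q ≠ (PySem.Dict.mk bm).get? q := by
      rw [PySem.Dict.contains_eq_decide_mem_keys, decide_eq_true_eq, sideDiff_mem_keys] at ht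
      exact ht
    have hne : (pvSideDiff bm om).get? q ≠ (pvSideDiff bm tm).get? q := by
      have := Bool.and_elim_right hpred
      simpa [bne_iff_ne] using this
    rw [sideDiff_get, sideDiff_get] at hne
    simp only [ho, hq, if_pos, ne_eq, not_false_eq_true] at hne
    have hot : (PySem.Dict.mk om).get? q ≠ (PySem.Dict.mk tm).get? q := by
      intro h; exact hne (by rw [h])
    simp [hot, ho, hq]
  · intro h
    rw [decide_eq_true_eq] at h
    obtain ⟨hot, ho, ht⟩ := h
    refine ⟨ho, ?_⟩
    have hc : (pvSideDiff bm tm).contains q = true := by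
      rw [PySem.Dict.contains_eq_decide_mem_keys, decide_eq_true_eq, sideDiff_mem_keys]
      exact ht
    have hne : (pvSideDiff bm om).get? q ≠ (pvSideDiff bm tm).get? q := by
      rw [sideDiff_get, sideDiff_get]
      simp only [ho, ht, if_pos, ne_eq, not_false_eq_true]
      intro h; exact hot (Option.some_injective _ h)
    simp [hc, bne_iff_ne, hne]

-- lookup in the combined (base ⊕ patches) dict
lemma combined_get (bm om tm : List (String × String)) (q : String) :
    (pvCombined bm om tm).get? q
      = (if (PySem.Dict.mk tm).get? q ≠ (PySem.Dict.mk bm).get? q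
         then some ((PySem.Dict.mk tm).get? q)
         else if (PySem.Dict.mk om).get? q ≠ (PySem.Dict.mk bm).get? q
         then some ((PySem.Dict.mk om).get? q)
         else ((PySem.Dict.mk bm).get? q).map some) := by
  unfold pvCombined
  have hkeyso : ((pvSideDiff bm om).items.map Prod.fst) = (pvSideDiff bm om).keys := rfl
  have hkeyst : ((pvSideDiff bm tm).items.map Prod.fst) = (pvSideDiff bm tm).keys := rfl
  have hndo : ((pvSideDiff bm om).items.map Prod.fst).Nodup := by
    rw [hkeyso]; exact sideDiff_nodup bm om
  have hndt : ((pvSideDiff bm tm).items.map Prod.fst).Nodup := by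
    rw [hkeyst]; exact sideDiff_nodup bm tm
  rw [get?_update_nodup _ _ hndt q, get?_update_nodup _ _ hndo q]
  have hmkd : ∀ (d : PySem.Dict String (Option String)), PySem.Dict.mk d.items = d := by
    intro d; cases d; rfl
  rw [hkeyst, hkeyso, hmkd, hmkd]
  by_cases ht : (PySem.Dict.mk tm).get? q ≠ (PySem.Dict.mk bm).get? q
  · have : q ∈ (pvSideDiff bm tm).keys := (sideDiff_mem_keys bm tm q).mpr ht
    rw [if_pos this, sideDiff_get, if_pos ht, if_pos ht]
  · have hnt : q ∉ (pvSideDiff bm tm).keys := fun h => ht ((sideDiff_mem_keys bm tm q).mp h)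
    rw [if_neg hnt, if_neg ht]
    by_cases ho : (PySem.Dict.mk om).get? q ≠ (PySem.Dict.mk bm).get? q
    · have : q ∈ (pvSideDiff bm om).keys := (sideDiff_mem_keys bm om q).mpr ho
      rw [if_pos this, sideDiff_get, if_pos ho, if_pos ho]
    · have hno : q ∉ (pvSideDiff bm om).keys := fun h => ho ((sideDiff_mem_keys bm om q).mp h)
      rw [if_neg hno, if_neg ho, mkmap_get]

lemma combined_keys_nodup (bm om tm : List (String × String)) (hb : (bm.map Prod.fst).Nodup) :
    (pvCombined bm om tm).keys.Nodup := by
  unfold pvCombined PySem.Dict.update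
  rw [PySem.Dict.keys_foldl_insert_key _ Prod.fst (fun _ x => x.2),
    PySem.Dict.keys_foldl_insert_key _ Prod.fst (fun _ x => x.2)]
  apply PySem.Set.nodup_update
  apply PySem.Set.nodup_update
  simpa [PySem.Dict.keys_mk, List.map_map, Function.comp] using hb

lemma combined_mem_keys (bm om tm : List (String × String)) (q : String) :
    q ∈ (pvCombined bm om tm).keys
      ↔ ((PySem.Dict.mk bm).get? q ≠ none ∨ (PySem.Dict.mk om).get? q ≠ none
          ∨ (PySem.Dict.mk tm).get? q ≠ none) := by
  unfold pvCombined PySem.Dict.update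
  rw [PySem.Dict.keys_foldl_insert_key _ Prod.fst (fun _ x => x.2),
    PySem.Dict.keys_foldl_insert_key _ Prod.fst (fun _ x => x.2),
    PySem.Set.mem_update, PySem.Set.mem_update]
  have hko : ((pvSideDiff bm om).items.map Prod.fst) = (pvSideDiff bm om).keys := rfl
  have hkt : ((pvSideDiff bm tm).items.map Prod.fst) = (pvSideDiff bm tm).keys := rfl
  rw [hko, hkt, sideDiff_mem_keys, sideDiff_mem_keys]
  have hbase : q ∈ (PySem.Dict.mk (bm.map (fun kv => (kv.1, some kv.2)))).keys
      ↔ (PySem.Dict.mk bm).get? q ≠ none := by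
    rw [PySem.Dict.keys_mk, List.map_map]
    have : (Prod.fst ∘ fun kv : String × String => (kv.1, some kv.2)) = Prod.fst := rfl
    rw [this, mem_keys_iff_get]
  rw [hbase]
  constructor
  · rintro ((hb | ho) | ht)
    · exact Or.inl hb
    · rcases em ((PySem.Dict.mk om).get? q = none) with h | h
      · exact Or.inl (fun hb => ho (by rw [h, hb]))
      · exact Or.inr (Or.inl h)
    · rcases em ((PySem.Dict.mk tm).get? q = none) with h | h
      · exact Or.inl (fun hb => ht (by rw [h, hb]))
      · exact Or.inr (Or.inr h)
  · rintro (hb | ho | ht)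
    · exact Or.inl (Or.inl hb)
    · rcases em ((PySem.Dict.mk om).get? q = (PySem.Dict.mk bm).get? q) with h | h
      · exact Or.inl (Or.inl (fun hb => ho (by rw [h, hb])))
      · exact Or.inl (Or.inr h)
    · rcases em ((PySem.Dict.mk tm).get? q = (PySem.Dict.mk bm).get? q) with h | h
      · exact Or.inl (Or.inl (fun hb => ht (by rw [h, hb])))
      · exact Or.inr h

-- A's sorted path list
def pvPathsA (bm om tm : List (String × String)) : List String :=
  PySem.List.sorted
    (PySem.Set.union (PySem.Set.union (PySem.Set.ofList (bm.map Prod.fst)) (om.map Prod.fst)) (tm.map Prod.fst))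
    (fun p => p)

lemma pathsA_nodup (bm om tm : List (String × String)) : (pvPathsA bm om tm).Nodup := by
  unfold pvPathsA
  exact ((PySem.List.sorted_perm _ _ _).nodup_iff).mpr
    (PySem.Set.nodup_union _ _ (PySem.Set.nodup_union _ _ (PySem.Set.nodup_ofList _)))

lemma pathsA_mem (bm om tm : List (String × String)) (q : String) :
    q ∈ pvPathsA bm om tm
      ↔ ((PySem.Dict.mk bm).get? q ≠ none ∨ (PySem.Dict.mk om).get? q ≠ none
          ∨ (PySem.Dict.mk tm).get? q ≠ none) := by
  unfold pvPathsA
  rw [PySem.List.mem_sorted, PySem.Set.mem_union, PySem.Set.mem_union, PySem.Set.mem_ofList,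
    mem_keys_iff_get, mem_keys_iff_get, mem_keys_iff_get]
  tauto

lemma pathsA_pairwise (bm om tm : List (String × String)) :
    (pvPathsA bm om tm).Pairwise (· ≤ ·) := by
  unfold pvPathsA
  exact PySem.List.sorted_pairwise _ _

-- B's sorted(combined) is exactly A's sorted path list
lemma sorted_combined_eq_paths (bm om tm : List (String × String)) (hb : (bm.map Prod.fst).Nodup) :
    PySem.List.sorted (pvCombined bm om tm).keys (fun p => p) = pvPathsA bm om tm := by
  unfold pvPathsA
  apply PySem.List.sorted_eq_sorted_of_perm _ _ _ (fun _ _ h => h)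
  apply List.perm_of_nodup_nodup_toFinset_eq (combined_keys_nodup bm om tm hb)
    (PySem.Set.nodup_union _ _ (PySem.Set.nodup_union _ _ (PySem.Set.nodup_ofList _)))
  ext q
  rw [List.mem_toFinset, List.mem_toFinset, combined_mem_keys,
    PySem.Set.mem_union, PySem.Set.mem_union, PySem.Set.mem_ofList,
    mem_keys_iff_get, mem_keys_iff_get, mem_keys_iff_get]
  tauto

-- B's sorted conflicts equal A's conflicts (the filter of the same predicate over sorted paths)
lemma conflictsB_eq (bm om tm : List (String × String)) :
    PySem.List.sorted (pvConflictsB bm om tm) (fun p => p)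
      = (pvPathsA bm om tm).filter (pvGA bm om tm) := by
  apply PySem.List.sorted_id_eq_of_perm_of_pairwise
  · apply List.perm_of_nodup_nodup_toFinset_eq
    · exact (pathsA_nodup bm om tm).filter _
    · exact PySem.Set.nodup_ofList _
    · ext q
      rw [List.mem_toFinset, List.mem_toFinset, List.mem_filter]
      rw [conflictsB_mem bm om tm q]
      constructor
      · intro ⟨hq, hc⟩; exact hc
      · intro hc
        refine ⟨?_, hc⟩
        rw [pathsA_mem]
        rw [pvGA, pvConfl, decide_eq_true_eq] at hc
        obtain ⟨hot, ho, ht⟩ := hc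
        rcases em ((PySem.Dict.mk om).get? q = none) with h | h
        · exact Or.inl (fun hb => ho (by rw [h, hb]))
        · exact Or.inr (Or.inl h)
  · exact List.Pairwise.sublist List.filter_sublist (pathsA_pairwise bm om tm)

-- per-path: A's stored value equals what B's final comprehension stores
lemma pvFA_eq_pvFB (bm om tm : List (String × String)) (p : String) :
    pvFA bm om tm p = pvFB bm om tm p := by
  unfold pvFA pvFB
  rw [combined_get bm om tm]
  have hcontains : (pvConflictsB bm om tm).contains p = pvGA bm om tm p := by
    rcases hc : pvGA bm om tm p with _ | _
    · rw [Bool.eq_false_iff]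
      intro hcc
      have hmem := (PySem.Set.contains_iff _ _).mp hcc
      rw [conflictsB_mem] at hmem
      simp [hc] at hmem
    · exact (PySem.Set.contains_iff _ _).mpr ((conflictsB_mem bm om tm p).mpr hc)
  rw [hcontains]
  unfold pvGA pvChoose pvConfl
  generalize (PySem.Dict.mk bm).get? p = b
  generalize (PySem.Dict.mk om).get? p = o
  generalize (PySem.Dict.mk tm).get? p = t
  rcases b with _ | bv <;> rcases o with _ | ov <;> rcases t with _ | tv <;>
    split_ifs <;> simp_all

-- ===== VERDICT (by name: the statement is the Claim_ definition above) =====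
theorem merge_tree_maps_spec : Claim_equal_merge_tree_maps := by
  intro bm om tm _ hpre
  obtain ⟨hb, _, _⟩ := hpre
  have hsplit : (pvPathsA bm om tm).foldl (pvStepA bm om tm)
      ((PySem.Dict.mk [] : PySem.Dict String String), ([] : List String))
      = (pvFoldIns (pvFA bm om tm) (pvPathsA bm om tm),
         (pvPathsA bm om tm).foldl
          (fun c p => if pvGA bm om tm p then c ++ [p] else c) ([] : List String)) := by
    rw [PySem.List.foldl_congr_mem _ (pvStepA bm om tm)
        (fun (s : PySem.Dict String String × List String) (p : String) =>
          ((pvFA bm om tm p).elim s.1 (fun v => s.1.insert p v),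
          (if pvGA bm om tm p then s.2 ++ [p] else s.2)))
        _ (fun s p _ => pvStepA_eq bm om tm s p)]
    exact PySem.List.foldl_prod_mk
      (f := fun (d : PySem.Dict String String) (p : String) =>
        (pvFA bm om tm p).elim d (fun v => d.insert p v))
      (g := fun (c : List String) (p : String) => if pvGA bm om tm p then c ++ [p] else c) _ _ _
  have hA : merge_tree_maps bm om tm
      = ((pvFoldIns (pvFA bm om tm) (pvPathsA bm om tm)).items,
         (pvPathsA bm om tm).filter (pvGA bm om tm)) := by
    show (((pvPathsA bm om tm).foldl (pvStepA bm om tm)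
        ((PySem.Dict.mk [] : PySem.Dict String String), ([] : List String))).1.items,
      ((pvPathsA bm om tm).foldl (pvStepA bm om tm)
        ((PySem.Dict.mk [] : PySem.Dict String String), ([] : List String))).2) = _
    rw [hsplit, PySem.List.foldl_append_if_eq_filter (pvGA bm om tm)]
    simp
  have hBfold : (PySem.List.sorted (pvCombined bm om tm).keys (fun p => p)).foldl
      (pvStepB bm om tm (pvConflictsB bm om tm)) (PySem.Dict.empty : PySem.Dict String String)
      = pvFoldIns (pvFB bm om tm) (PySem.List.sorted (pvCombined bm om tm).keys (fun p => p)) :=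
    PySem.List.foldl_congr_mem _ _ _ _ (fun d p _ => pvStepB_eq bm om tm d p)
  have hBv : merge_tree_maps_alt bm om tm
      = ((pvFoldIns (pvFA bm om tm) (pvPathsA bm om tm)).items,
         (pvPathsA bm om tm).filter (pvGA bm om tm)) := by
    show (((PySem.List.sorted (pvCombined bm om tm).keys (fun p => p)).foldl
        (pvStepB bm om tm (pvConflictsB bm om tm)) (PySem.Dict.empty : PySem.Dict String String)).items,
      PySem.List.sorted (pvConflictsB bm om tm) (fun p => p)) = _
    rw [hBfold, sorted_combined_eq_paths bm om tm hb,
      pvFoldIns_congr (pvFB bm om tm) (pvFA bm om tm) (pvPathsA bm om tm)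
        (fun p _ => (pvFA_eq_pvFB bm om tm p).symm),
      conflictsB_eq]
  unfold Spec_merge_tree_maps
  rw [hA, hBv]
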